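-- pv_equiv track=rewrite | github.com/homechan77/Algorithm | Programmers/algorithms_ExhaustiveSearch_모의고사.py | solution
-- ===== SOURCE A (Python) =====
-- def solution(answers):
--     cycling = [[1, 2, 3, 4, 5], [2, 1, 2, 3, 2, 4, 2, 5], [3, 3, 1, 1, 2, 2, 4, 4, 5, 5]]
--     relist = []
--     lenanswers = len(answers)
--
--     # 정답 개수를 통해 수포자들이 제출한 문제 개수를 재조정
--     for i in range(len(cycling)):
--         mok = lenanswers // len(cycling[i])
--         namuji = lenanswers % len(cycling[i])
--
--         if mok > 0:
--             relist.append(cycling[i] * mok)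
--             for j in range(namuji):
--                 relist[i].append(cycling[i][j])
--         else:
--             relist.append([])
--             for k in range(namuji):
--                 relist[i].append(cycling[i][k])
--
--     # 수포자들의 점수 산출
--     result = []
--     count = 0
--     for l in relist:
--         for m in range(lenanswers):
--             if l[m] == answers[m]:
--                 count += 1
--             if m == lenanswers-1:
--               result.append(count)
--               count = 0
--
--     # 가장 높은 점수의 수포자를 반환, 가장 높은 점수를 받은 사람이 여럿일 경우 return하는 값을 오름차순 정렬
--     final_result = []
--     maxresult = max(result)
--     for n in range(len(result)):
--         if result[n] == maxresult:
--             final_result.append(n+1)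
--
--     return final_result
-- ===== SOURCE B (Python) =====
-- def solution(answers):
--     p1 = [1, 2, 3, 4, 5]
--     p2 = [2, 1, 2, 3, 2, 4, 2, 5]
--     p3 = [3, 3, 1, 1, 2, 2, 4, 4, 5, 5]
--     s1 = s2 = s3 = 0
--     for i, a in enumerate(answers):
--         if p1[i % 5] == a:
--             s1 += 1
--         if p2[i % 8] == a:
--             s2 += 1
--         if p3[i % 10] == a:
--             s3 += 1
--     best = max(s1, s2, s3)
--     return [p for p, s in ((1, s1), (2, s2), (3, s3)) if s == best]
-- ===== Notes on version B (the rewrite author's own statement) =====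
-- stated objective: simpler
-- what changed: B never materializes the length-adjusted answer sheets: it keeps three scalar counters and does one enumerate pass comparing each answer with pattern[i % len(pattern)], then selects the winners from a literal triple, instead of A's building three resized pattern lists and re-scanning answers once per list.
-- outside the precondition, e.g. on solution([]): A raises ValueError, B returns [1, 2, 3]
import Mathlib
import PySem

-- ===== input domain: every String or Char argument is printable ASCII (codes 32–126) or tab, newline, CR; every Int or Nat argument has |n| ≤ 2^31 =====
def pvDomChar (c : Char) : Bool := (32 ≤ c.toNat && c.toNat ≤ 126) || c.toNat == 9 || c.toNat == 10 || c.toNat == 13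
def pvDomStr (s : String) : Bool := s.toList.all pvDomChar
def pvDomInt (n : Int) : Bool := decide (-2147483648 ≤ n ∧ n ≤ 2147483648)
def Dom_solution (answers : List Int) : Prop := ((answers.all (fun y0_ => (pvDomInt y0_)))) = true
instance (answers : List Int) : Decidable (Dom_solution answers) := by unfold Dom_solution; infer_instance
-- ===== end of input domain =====

-- B replaces A's materialized, length-adjusted answer sheets by three scalar counters filled
-- in one enumerate pass via pattern[i % len]; objective: simpler (same O(n) time, O(1) space).
-- On empty input A raises ValueError (max of an empty list); Pre_ excludes exactly that input.

-- ===== PORT A =====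
-- one iteration of A's first loop: the resized sheet for one pattern (cycling[i]*mok, then
-- namuji element-by-element appends; namuji < len pat so getD never hits its default)
def relistOf (pat : List Int) (n : Nat) : List Int :=
  let mok := PySem.Int.floordiv (n : Int) (pat.length : Int)
  let namuji := PySem.Int.mod (n : Int) (pat.length : Int)
  if mok > 0 then
    (List.range namuji.toNat).foldl (fun l j => l ++ [pat.getD j 0])
      (List.flatten (List.replicate mok.toNat pat))
  else
    (List.range namuji.toNat).foldl (fun l k => l ++ [pat.getD k 0]) []

def solution (answers : List Int) : List Int :=
  let cycling : List (List Int) :=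
    [[1,2,3,4,5], [2,1,2,3,2,4,2,5], [3,3,1,1,2,2,4,4,5,5]]
  let lenanswers := answers.length
  let relist := (List.range cycling.length).foldl
    (fun rl i => rl ++ [relistOf (cycling.getD i []) lenanswers]) []
  -- scoring loop: l[m] and answers[m] are always in range (each sheet has length lenanswers)
  let result := (relist.foldl (fun (st : List Int × Int) l =>
      (List.range lenanswers).foldl (fun st2 m =>
        let st3 := if l.getD m 0 = answers.getD m 0 then (st2.1, st2.2 + 1) else st2
        if m = lenanswers - 1 then (st3.1 ++ [st3.2], (0 : Int)) else st3) st)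
    (([] : List Int), (0 : Int))).1
  match PySem.List.max? result (fun x => x) with
  | none => []            -- Python: max([]) raises ValueError; excluded by Pre_solution
  | some mx =>
    (List.range result.length).foldl
      (fun fr i => if result.getD i 0 = mx then fr ++ [(i : Int) + 1] else fr) []

-- ===== PORT B =====
def solution_alt (answers : List Int) : List Int :=
  let p1 : List Int := [1,2,3,4,5]
  let p2 : List Int := [2,1,2,3,2,4,2,5]
  let p3 : List Int := [3,3,1,1,2,2,4,4,5,5]
  -- pat[i % len]: i % len is always in range, so .getD never hits its default
  let s := (PySem.List.enumerate answers 0).foldl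
    (fun (s : Int × Int × Int) ia =>
      ((if (PySem.List.pyGet? p1 (PySem.Int.mod ia.1 5)).getD 0 = ia.2 then s.1 + 1 else s.1),
       (if (PySem.List.pyGet? p2 (PySem.Int.mod ia.1 8)).getD 0 = ia.2 then s.2.1 + 1 else s.2.1),
       (if (PySem.List.pyGet? p3 (PySem.Int.mod ia.1 10)).getD 0 = ia.2 then s.2.2 + 1 else s.2.2)))
    ((0 : Int), (0 : Int), (0 : Int))
  let best := max (max s.1 s.2.1) s.2.2
  ([(1, s.1), (2, s.2.1), (3, s.2.2)] : List (Int × Int)).foldl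
    (fun acc ps => if ps.2 = best then acc ++ [ps.1] else acc) []

-- ===== PRECONDITION & SPEC =====
-- Pre_ excludes only the empty list, on which A raises ValueError at max([]).
def Pre_solution (answers : List Int) : Prop := answers ≠ []
instance (answers : List Int) : Decidable (Pre_solution answers) := by
  unfold Pre_solution; infer_instance
def pvWitness_solution : List Int := [1, 3, 2, 4, 2]

def Spec_solution (answers : List Int) (out : List Int) : Prop := out = solution_alt answers
instance (answers : List Int) (out : List Int) : Decidable (Spec_solution answers out) := by
  unfold Spec_solution; infer_instance

-- ===== CLAIM (what is proved, stated in full; the proofs are below) =====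
def Claim_equal_solution : Prop := ∀ (answers : List Int), Dom_solution answers →
  Pre_solution answers → Spec_solution answers (solution answers)

-- ===== LEMMAS AND PROOFS =====

-- the number of matches (as an Int) of answers against the cyclic pattern pat
def cyc (pat : List Int) (answers : List Int) : Int :=
  (((List.range answers.length).countP
      (fun m => pat.getD (m % pat.length) 0 = answers.getD m 0) : Nat) : Int)

-- the element-appending loop is base ++ the mapped prefix
theorem foldl_append_getD (pat : List Int) (r : Nat) (base : List Int) :
    (List.range r).foldl (fun l j => l ++ [pat.getD j 0]) base
      = base ++ (List.range r).map (fun j => pat.getD j 0) := by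
  induction r generalizing base with
  | zero => simp
  | succ r ih => rw [List.range_succ, List.foldl_append, ih]; simp

-- pointwise value of the resized sheet
theorem getD_flatten_replicate (pat : List Int) (hp : pat ≠ []) (k r m : Nat)
    (hr : r ≤ pat.length) (hm : m < k * pat.length + r) :
    (List.flatten (List.replicate k pat) ++ (List.range r).map (fun j => pat.getD j 0)).getD m 0
      = pat.getD (m % pat.length) 0 := by
  induction k generalizing m with
  | zero =>
    simp only [List.replicate_zero, List.flatten_nil, List.nil_append]
    have hmr : m < r := by omega
    have h1 : m % pat.length = m := Nat.mod_eq_of_lt (by omega)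
    rw [h1]
    rw [List.getD_eq_getElem?_getD, List.getElem?_map]
    simp [List.getElem?_range hmr, List.getD_eq_getElem?_getD]
  | succ k ih =>
    simp only [List.replicate_succ, List.flatten_cons, List.append_assoc]
    by_cases hms : m < pat.length
    · have h1 : m % pat.length = m := Nat.mod_eq_of_lt hms
      rw [h1, List.getD_eq_getElem?_getD, List.getElem?_append_left hms,
        ← List.getD_eq_getElem?_getD]
    · have hlen : 0 < pat.length := List.length_pos_iff.mpr hp
      have h2 : m % pat.length = (m - pat.length) % pat.length := by
        conv_lhs => rw [show m = (m - pat.length) + pat.length by omega]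
        rw [Nat.add_mod_right]
      rw [h2, List.getD_eq_getElem?_getD, List.getElem?_append_right (by omega),
        ← List.getD_eq_getElem?_getD]
      refine ih (m - pat.length) ?_
      have h3 : (k + 1) * pat.length = k * pat.length + pat.length := by ring
      omega

-- the resized sheet, closed form (for any branch of the if)
theorem relistOf_eq (pat : List Int) (hp : pat ≠ []) (n : Nat) :
    relistOf pat n
      = List.flatten (List.replicate (n / pat.length) pat)
          ++ (List.range (n % pat.length)).map (fun j => pat.getD j 0) := by
  have hlen : 0 < pat.length := List.length_pos_iff.mpr hp
  unfold relistOf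
  rw [PySem.Int.floordiv_natCast, PySem.Int.mod_natCast]
  simp only [gt_iff_lt, Int.natCast_pos, Int.toNat_natCast]
  by_cases h : 0 < n / pat.length
  · rw [if_pos h]
    exact foldl_append_getD _ _ _
  · rw [if_neg h]
    have h0 : n / pat.length = 0 := Nat.eq_zero_of_not_pos h
    rw [h0, List.replicate_zero, List.flatten_nil, List.nil_append]
    exact foldl_append_getD pat _ []

theorem getD_relistOf (pat : List Int) (hp : pat ≠ []) (n m : Nat) (hm : m < n) :
    (relistOf pat n).getD m 0 = pat.getD (m % pat.length) 0 := by
  have hlen : 0 < pat.length := List.length_pos_iff.mpr hp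
  rw [relistOf_eq pat hp n]
  exact getD_flatten_replicate pat hp _ _ m (Nat.le_of_lt (Nat.mod_lt _ hlen))
    (by
      have h1 := Nat.div_add_mod n pat.length
      have h2 : (n / pat.length) * pat.length = pat.length * (n / pat.length) :=
        Nat.mul_comm _ _
      omega)

-- A's inner scoring loop before the last index: pure counting, no append
theorem scoreLoop_pre (answers l : List Int) (n : Nat) (ms : List Nat)
    (hms : ∀ m ∈ ms, m ≠ n - 1) (res : List Int) (c : Int) :
    ms.foldl (fun st2 m =>
        if m = n - 1 then
          ((if l.getD m 0 = answers.getD m 0 then (st2.1, st2.2 + 1) else st2).1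
              ++ [(if l.getD m 0 = answers.getD m 0 then (st2.1, st2.2 + 1) else st2).2],
            (0 : Int))
        else if l.getD m 0 = answers.getD m 0 then (st2.1, st2.2 + 1) else st2) (res, c)
      = (res, c + ((ms.countP (fun m => l.getD m 0 = answers.getD m 0) : Nat) : Int)) := by
  induction ms generalizing c with
  | nil => simp
  | cons m ms ih =>
    have hm : m ≠ n - 1 := hms m (List.mem_cons_self)
    have hms' : ∀ m' ∈ ms, m' ≠ n - 1 := fun m' h => hms m' (List.mem_cons_of_mem m h)
    rw [List.foldl_cons]
    by_cases h : l.getD m 0 = answers.getD m 0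
    · simp only [if_pos h, if_neg hm]
      rw [ih hms', List.countP_cons]
      simp only [List.getD_eq_getElem?_getD] at h
      simp [h, Prod.ext_iff]
      omega
    · simp only [if_neg h, if_neg hm]
      rw [ih hms', List.countP_cons]
      simp only [List.getD_eq_getElem?_getD] at h
      simp [h]

-- A's inner scoring loop in full: appends exactly the count
theorem scoreLoop (answers l : List Int) (n : Nat) (hn : 0 < n) (res : List Int) :
    (List.range n).foldl (fun st2 m =>
        if m = n - 1 then
          ((if l.getD m 0 = answers.getD m 0 then (st2.1, st2.2 + 1) else st2).1
              ++ [(if l.getD m 0 = answers.getD m 0 then (st2.1, st2.2 + 1) else st2).2],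
            (0 : Int))
        else if l.getD m 0 = answers.getD m 0 then (st2.1, st2.2 + 1) else st2) (res, 0)
      = (res ++ [((List.range n).countP (fun m => l.getD m 0 = answers.getD m 0) : Int)],
          (0 : Int)) := by
  obtain ⟨n', rfl⟩ : ∃ n', n = n' + 1 := ⟨n - 1, by omega⟩
  rw [List.range_succ, List.foldl_append,
    scoreLoop_pre answers l (n' + 1) (List.range n') (by simp; omega) res 0,
    List.foldl_cons, List.foldl_nil]
  by_cases h : l.getD n' 0 = answers.getD n' 0 <;>
    simp only [List.getD_eq_getElem?_getD] at h <;>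
    simp [h, List.countP_append]

-- count against the sheet = count against the cyclic pattern
theorem count_relistOf (pat : List Int) (hp : pat ≠ []) (answers : List Int) :
    ((List.range answers.length).countP
        (fun m => (relistOf pat answers.length).getD m 0 = answers.getD m 0) : Int)
      = cyc pat answers := by
  unfold cyc
  congr 1
  refine List.countP_congr (fun m hmm => ?_)
  simp only [List.mem_range] at hmm
  have h := getD_relistOf pat hp answers.length m hmm
  simp only [List.getD_eq_getElem?_getD] at h
  simp [h]

-- reading pat[k % len pat] through pyGet?/mod, one lemma per literal pattern
theorem pyget_mod5 (k : Nat) :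
    (PySem.List.pyGet? ([1,2,3,4,5] : List Int) (PySem.Int.mod (k : Int) 5)).getD 0
      = List.getD ([1,2,3,4,5] : List Int) (k % 5) 0 := by
  rw [show (5 : Int) = ((5 : Nat) : Int) from by norm_num, PySem.Int.mod_natCast,
    PySem.List.pyGet?_natCast, ← List.getD_eq_getElem?_getD]

theorem pyget_mod8 (k : Nat) :
    (PySem.List.pyGet? ([2,1,2,3,2,4,2,5] : List Int) (PySem.Int.mod (k : Int) 8)).getD 0
      = List.getD ([2,1,2,3,2,4,2,5] : List Int) (k % 8) 0 := by
  rw [show (8 : Int) = ((8 : Nat) : Int) from by norm_num, PySem.Int.mod_natCast,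
    PySem.List.pyGet?_natCast, ← List.getD_eq_getElem?_getD]

theorem pyget_mod10 (k : Nat) :
    (PySem.List.pyGet? ([3,3,1,1,2,2,4,4,5,5] : List Int) (PySem.Int.mod (k : Int) 10)).getD 0
      = List.getD ([3,3,1,1,2,2,4,4,5,5] : List Int) (k % 10) 0 := by
  rw [show (10 : Int) = ((10 : Nat) : Int) from by norm_num, PySem.Int.mod_natCast,
    PySem.List.pyGet?_natCast, ← List.getD_eq_getElem?_getD]

-- one appended answer adds its own cyclic match to the count
theorem cyc_snoc (pat : List Int) (xs : List Int) (x : Int) :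
    cyc pat (xs ++ [x])
      = cyc pat xs
          + (if pat.getD (xs.length % pat.length) 0 = x then 1 else 0) := by
  unfold cyc
  simp only [List.length_append, List.length_cons, List.length_nil, zero_add]
  rw [List.range_succ, List.countP_append]
  have h1 : (List.range xs.length).countP
        (fun m => decide (pat.getD (m % pat.length) 0 = (xs ++ [x]).getD m 0)) =
      (List.range xs.length).countP
        (fun m => decide (pat.getD (m % pat.length) 0 = xs.getD m 0)) := by
    refine List.countP_congr (fun m hm => ?_)
    simp only [List.mem_range] at hm
    have hg : (xs ++ [x]).getD m 0 = xs.getD m 0 := by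
      rw [List.getD_eq_getElem?_getD, List.getElem?_append_left hm,
        ← List.getD_eq_getElem?_getD]
    rw [hg]
  rw [h1]
  simp only [List.countP_cons, List.countP_nil, List.getD_eq_getElem?_getD] at *
  by_cases hx : pat[xs.length % pat.length]?.getD 0 = x
  · simp [hx]
  · simp [hx]

-- B's fold, computed (snoc induction over answers)
theorem bfold (answers : List Int) (s1 s2 s3 : Int) :
    (PySem.List.enumerate answers 0).foldl
      (fun (s : Int × Int × Int) ia =>
        ((if (PySem.List.pyGet? ([1,2,3,4,5] : List Int) (PySem.Int.mod ia.1 5)).getD 0 = ia.2 then s.1 + 1 else s.1),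
         (if (PySem.List.pyGet? ([2,1,2,3,2,4,2,5] : List Int) (PySem.Int.mod ia.1 8)).getD 0 = ia.2 then s.2.1 + 1 else s.2.1),
         (if (PySem.List.pyGet? ([3,3,1,1,2,2,4,4,5,5] : List Int) (PySem.Int.mod ia.1 10)).getD 0 = ia.2 then s.2.2 + 1 else s.2.2)))
      (s1, s2, s3)
    = (s1 + cyc [1,2,3,4,5] answers, s2 + cyc [2,1,2,3,2,4,2,5] answers,
        s3 + cyc [3,3,1,1,2,2,4,4,5,5] answers) := by
  induction answers using List.reverseRecOn generalizing s1 s2 s3 with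
  | nil => simp [cyc, PySem.List.enumerate_nil]
  | append_singleton xs x ih =>
    rw [PySem.List.enumerate_append, List.foldl_append, ih]
    simp only [PySem.List.enumerate_cons, PySem.List.enumerate_nil, List.foldl_cons,
      List.foldl_nil]
    rw [cyc_snoc, cyc_snoc, cyc_snoc]
    simp only [zero_add]
    rw [pyget_mod5 xs.length, pyget_mod8 xs.length, pyget_mod10 xs.length,
      show ([1,2,3,4,5] : List Int).length = 5 from rfl,
      show ([2,1,2,3,2,4,2,5] : List Int).length = 8 from rfl,
      show ([3,3,1,1,2,2,4,4,5,5] : List Int).length = 10 from rfl]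
    split_ifs <;> simp [Prod.ext_iff] <;> omega

-- the common shape of both final selection loops
def winners (c1 c2 c3 : Int) : List Int :=
  (if c1 = max (max c1 c2) c3 then [(1 : Int)] else [])
    ++ (if c2 = max (max c1 c2) c3 then [(2 : Int)] else [])
    ++ (if c3 = max (max c1 c2) c3 then [(3 : Int)] else [])

theorem B_result (answers : List Int) :
    solution_alt answers
      = winners (cyc [1,2,3,4,5] answers) (cyc [2,1,2,3,2,4,2,5] answers)
          (cyc [3,3,1,1,2,2,4,4,5,5] answers) := by
  simp only [solution_alt]
  rw [bfold answers 0 0 0]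
  simp only [zero_add, List.foldl_cons, List.foldl_nil, List.nil_append]
  unfold winners
  split_ifs <;> simp

theorem A_result (answers : List Int) (hne : answers ≠ []) :
    solution answers
      = winners (cyc [1,2,3,4,5] answers) (cyc [2,1,2,3,2,4,2,5] answers)
          (cyc [3,3,1,1,2,2,4,4,5,5] answers) := by
  have hn : 0 < answers.length := List.length_pos_iff.mpr hne
  simp only [solution]
  rw [show (List.range ([[1,2,3,4,5],[2,1,2,3,2,4,2,5],[3,3,1,1,2,2,4,4,5,5]] :
    List (List Int)).length) = [0, 1, 2] from rfl]
  simp only [List.foldl_cons, List.foldl_nil, List.nil_append,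
    List.cons_append, List.getD_cons_zero, List.getD_cons_succ]
  rw [scoreLoop answers _ answers.length hn, scoreLoop answers _ answers.length hn,
    scoreLoop answers _ answers.length hn]
  rw [count_relistOf _ (by decide) answers, count_relistOf _ (by decide) answers,
    count_relistOf _ (by decide) answers]
  simp only [List.nil_append, List.cons_append]
  rw [PySem.List.max?_id_cons]
  simp only [List.foldl_cons, List.foldl_nil]
  rw [show (List.range ([cyc [1,2,3,4,5] answers, cyc [2,1,2,3,2,4,2,5] answers,
    cyc [3,3,1,1,2,2,4,4,5,5] answers].length)) = [0, 1, 2] from rfl]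
  simp only [List.foldl_cons, List.foldl_nil, List.getD_cons_zero, List.getD_cons_succ]
  unfold winners
  split_ifs <;> simp

-- ===== VERDICT (by name: the statement is the Claim_ definition above) =====
theorem solution_spec : Claim_equal_solution := by
  intro answers _ hpre
  unfold Spec_solution
  rw [A_result answers hpre, B_result answers]
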